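-- pv_equiv track=rewrite | github.com/marchartley/generation-terrain-procedural | Python_tests/Graph.py | containsSubarray
-- ===== SOURCE A (Python) =====
-- from typing import List, Union, Tuple, Optional, Any
--
-- def containsSubarray(originalArray: List, subarray: List, checkReverse: bool = False, checkSlidingWindow: bool = False) -> bool:
--     notContained = len([x for x in range(len(originalArray)) if originalArray[x:x + len(subarray)] == subarray]) == 0
--
--     if checkSlidingWindow:
--         tmp = originalArray
--         for _ in range(len(originalArray)):
--             tmp = tmp[1:] + [tmp[0]]
--             notContained = notContained and len([x for x in range(len(tmp)) if tmp[x:x + len(subarray)] == subarray]) == 0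
--
--     if checkReverse:
--         notContained = notContained and not containsSubarray(originalArray,
--                                                              list(reversed(subarray)),
--                                                              False,
--                                                              checkSlidingWindow)
--     return not notContained
-- ===== SOURCE B (Python) =====
-- def _find(text, pat):
--     # straightforward window scan with early exit; only full windows are tried
--     m = len(pat)
--     for i in range(len(text) - m + 1):
--         if all(text[i + j] == pat[j] for j in range(m)):
--             return True
--     return False
--
--
-- def containsSubarray(originalArray, subarray, checkReverse=False, checkSlidingWindow=False):
--     pats = [subarray] + ([subarray[::-1]] if checkReverse else [])
--     if checkSlidingWindow:
--         # any rotation contains the pattern  <=>  the doubled array does (for len(pat) <= len(arr))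
--         text = originalArray + originalArray
--         return any(len(p) <= len(originalArray) and _find(text, p) for p in pats)
--     return any(_find(originalArray, p) for p in pats)
-- ===== Notes on version B (the rewrite author's own statement) =====
-- stated objective: faster
-- what changed: Instead of materialising every rotation of the array and re-scanning each (and recursing for the reversed pattern), B searches the doubled array once per pattern with an early-exit window scan guarded by len(sub) <= len(arr), handling the reversed pattern as just a second pattern.
-- intended difference: On originalArray=[] with subarray=[], A returns False but the empty list does contain the empty subarray, so B returns True, the intended value (A returns True for an empty subarray on every non-empty array). — e.g. on containsSubarray([], [], false, false): A returns false, B returns true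
import Mathlib
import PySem

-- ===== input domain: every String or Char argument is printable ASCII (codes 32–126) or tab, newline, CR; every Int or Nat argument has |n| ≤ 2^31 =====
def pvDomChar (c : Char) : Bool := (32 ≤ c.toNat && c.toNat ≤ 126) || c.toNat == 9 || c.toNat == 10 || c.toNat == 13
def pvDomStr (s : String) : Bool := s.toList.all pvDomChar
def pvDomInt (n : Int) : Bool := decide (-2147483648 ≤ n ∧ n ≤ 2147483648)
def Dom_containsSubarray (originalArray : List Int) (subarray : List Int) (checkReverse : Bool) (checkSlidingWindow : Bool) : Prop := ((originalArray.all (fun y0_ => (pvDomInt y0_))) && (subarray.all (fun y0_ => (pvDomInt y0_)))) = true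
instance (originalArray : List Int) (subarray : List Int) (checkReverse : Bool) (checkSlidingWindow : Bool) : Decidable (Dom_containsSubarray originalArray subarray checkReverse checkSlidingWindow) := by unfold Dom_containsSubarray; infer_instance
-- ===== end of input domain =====

-- B replaces A's rotate-and-rescan-every-rotation (plus a recursive call for the reversed
-- pattern) by one early-exit window scan over the doubled array per pattern: faster (measured).

-- ===== PORT A =====
-- len([x for x in range(len(orig)) if orig[x:x+len(sub)] == sub])
def pvCountA (orig sub : List Int) : Nat :=
  ((PySem.List.pyRange 0 (orig.length : Int) 1).filter
     (fun x => PySem.List.slice orig (some x) (some (x + (sub.length : Int))) == sub)).length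

-- tmp[1:] + [tmp[0]]  (tmp[0] guarded with a default: the loop never runs it on an empty list)
def pvStep1 (t : List Int) : List Int :=
  PySem.List.slice t (some 1) none ++ [(PySem.List.pyGet? t 0).getD 0]

-- the `for _ in range(len(originalArray))` loop, state = (tmp, notContained)
def pvSlideA (orig sub : List Int) (nc0 : Bool) : Bool :=
  ((List.range orig.length).foldl
     (fun (st : List Int × Bool) _ =>
        let tmp := pvStep1 st.1
        (tmp, st.2 && (pvCountA tmp sub == 0)))
     (orig, nc0)).2

-- the whole function with checkReverse = False (what A's recursive call computes, negated)
def pvNoRevA (orig sub : List Int) (slide : Bool) : Bool :=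
  let nc := pvCountA orig sub == 0
  let nc := if slide then pvSlideA orig sub nc else nc
  !nc

def containsSubarray (originalArray : List Int) (subarray : List Int) (checkReverse : Bool) (checkSlidingWindow : Bool) : Bool :=
  let nc := pvCountA originalArray subarray == 0
  let nc := if checkSlidingWindow then pvSlideA originalArray subarray nc else nc
  let nc := if checkReverse then nc && !(pvNoRevA originalArray subarray.reverse checkSlidingWindow) else nc
  !nc

-- ===== PORT B =====
-- _find: for i in range(len(text) - len(pat) + 1): if all(text[i+j] == pat[j] ...): return True
def pvFindB (text pat : List Int) : Bool :=
  (PySem.List.pyRange 0 ((text.length : Int) - (pat.length : Int) + 1) 1).any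
    (fun i => (PySem.List.pyRange 0 ((pat.length : Int)) 1).all
       (fun j => PySem.List.pyGet? text (i + j) == PySem.List.pyGet? pat j))

def containsSubarray_alt (originalArray : List Int) (subarray : List Int) (checkReverse : Bool) (checkSlidingWindow : Bool) : Bool :=
  let pats := [subarray] ++ (if checkReverse then [subarray.reverse] else [])
  if checkSlidingWindow then
    pats.any (fun p => decide (p.length ≤ originalArray.length) && pvFindB (originalArray ++ originalArray) p)
  else
    pats.any (fun p => pvFindB originalArray p)

-- ===== PRECONDITION & SPEC =====
-- On originalArray = [] with subarray = [], A returns False although the empty list does contain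
-- the empty subarray; B returns True, the intended value (A itself returns True for an empty
-- subarray on every non-empty array).
def D_containsSubarray (originalArray : List Int) (subarray : List Int) (checkReverse : Bool) (checkSlidingWindow : Bool) : Prop :=
  originalArray = [] ∧ subarray = []
instance (originalArray : List Int) (subarray : List Int) (checkReverse : Bool) (checkSlidingWindow : Bool) : Decidable (D_containsSubarray originalArray subarray checkReverse checkSlidingWindow) := by unfold D_containsSubarray; infer_instance

def Spec_containsSubarray (originalArray : List Int) (subarray : List Int) (checkReverse : Bool) (checkSlidingWindow : Bool) (out : Bool) : Prop := ¬ D_containsSubarray originalArray subarray checkReverse checkSlidingWindow → out = containsSubarray_alt originalArray subarray checkReverse checkSlidingWindow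
instance (originalArray : List Int) (subarray : List Int) (checkReverse : Bool) (checkSlidingWindow : Bool) (out : Bool) : Decidable (Spec_containsSubarray originalArray subarray checkReverse checkSlidingWindow out) := by unfold Spec_containsSubarray; infer_instance

def pvDiffWitness_containsSubarray : List Int × List Int × Bool × Bool := ([], [], false, false)
def pvDiffWitnessOut_containsSubarray : Bool × Bool := (false, true)

-- ===== CLAIM (what is proved, stated in full; the proofs are below) =====
def Claim_unchanged_containsSubarray : Prop := ∀ (originalArray : List Int) (subarray : List Int) (checkReverse : Bool) (checkSlidingWindow : Bool), Dom_containsSubarray originalArray subarray checkReverse checkSlidingWindow → Spec_containsSubarray originalArray subarray checkReverse checkSlidingWindow (containsSubarray originalArray subarray checkReverse checkSlidingWindow)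
def Claim_changed_containsSubarray : Prop := Dom_containsSubarray (pvDiffWitness_containsSubarray.1) (pvDiffWitness_containsSubarray.2.1) (pvDiffWitness_containsSubarray.2.2.1) (pvDiffWitness_containsSubarray.2.2.2) ∧ D_containsSubarray (pvDiffWitness_containsSubarray.1) (pvDiffWitness_containsSubarray.2.1) (pvDiffWitness_containsSubarray.2.2.1) (pvDiffWitness_containsSubarray.2.2.2) ∧ containsSubarray (pvDiffWitness_containsSubarray.1) (pvDiffWitness_containsSubarray.2.1) (pvDiffWitness_containsSubarray.2.2.1) (pvDiffWitness_containsSubarray.2.2.2) = pvDiffWitnessOut_containsSubarray.1 ∧ containsSubarray_alt (pvDiffWitness_containsSubarray.1) (pvDiffWitness_containsSubarray.2.1) (pvDiffWitness_containsSubarray.2.2.1) (pvDiffWitness_containsSubarray.2.2.2) = pvDiffWitnessOut_containsSubarray.2 ∧ pvDiffWitnessOut_containsSubarray.1 ≠ pvDiffWitnessOut_containsSubarray.2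
def Claim_exact_containsSubarray : Prop := ∀ (originalArray : List Int) (subarray : List Int) (checkReverse : Bool) (checkSlidingWindow : Bool), Dom_containsSubarray originalArray subarray checkReverse checkSlidingWindow → D_containsSubarray originalArray subarray checkReverse checkSlidingWindow → containsSubarray originalArray subarray checkReverse checkSlidingWindow ≠ containsSubarray_alt originalArray subarray checkReverse checkSlidingWindow

-- ===== LEMMAS AND PROOFS =====

-- an occurrence of p as a contiguous block of t
def pvOcc (t p : List Int) : Prop := ∃ i, i + p.length ≤ t.length ∧ (t.drop i).take p.length = p

lemma pvOcc_iff_infix (t p : List Int) : pvOcc t p ↔ p <:+: t := by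
  constructor
  · rintro ⟨i, hi, h⟩
    rw [← h]
    exact ((List.take_prefix _ _).isInfix).trans (List.drop_suffix i t).isInfix
  · rintro ⟨s, u, rfl⟩
    refine ⟨s.length, by simp, ?_⟩
    rw [show s ++ p ++ u = s ++ (p ++ u) by simp, List.drop_left, List.take_left]

-- B's scan, restated over Nat ranges
def pvFindN (t p : List Int) : Bool :=
  (List.range (t.length + 1 - p.length)).any
    (fun i => (List.range p.length).all (fun j => t[i+j]? == p[j]?))

lemma findB_eq_findN (t p : List Int) : pvFindB t p = pvFindN t p := by
  unfold pvFindB pvFindN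
  rw [PySem.List.pyRange_one, PySem.List.pyRange_one]
  simp only [List.any_map, List.all_map, Int.sub_zero, Int.toNat_natCast, zero_add]
  rw [show ((t.length : Int) - (p.length : Int) + 1).toNat = t.length + 1 - p.length by omega]
  refine List.any_congr rfl (fun i => ?_)
  refine List.all_congr rfl (fun j => ?_)
  simp only [Function.comp_apply]
  rw [show ((i : Int) + (j : Int)) = ((i + j : Nat) : Int) by push_cast; ring]
  rw [PySem.List.pyGet?_natCast, PySem.List.pyGet?_natCast]

lemma window_iff (t p : List Int) (i : Nat) (hi : i + p.length ≤ t.length) :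
    ((List.range p.length).all (fun j => t[i+j]? == p[j]?) = true) ↔ (t.drop i).take p.length = p := by
  simp only [List.all_eq_true, List.mem_range, beq_iff_eq]
  constructor
  · intro h
    apply List.ext_getElem?
    intro k
    rcases lt_or_ge k p.length with hk | hk
    · rw [List.getElem?_take_of_lt hk, List.getElem?_drop]
      exact h k hk
    · rw [List.getElem?_eq_none (by simp; omega), List.getElem?_eq_none (by omega)]
  · intro h j hj
    have := congrArg (fun l => l[j]?) h
    simpa [List.getElem?_take_of_lt hj, List.getElem?_drop] using this

lemma findN_iff (t p : List Int) : pvFindN t p = true ↔ pvOcc t p := by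
  unfold pvFindN
  simp only [List.any_eq_true, List.mem_range]
  constructor
  · rintro ⟨i, hi, hw⟩
    exact ⟨i, by omega, (window_iff t p i (by omega)).mp hw⟩
  · rintro ⟨i, hi, hw⟩
    exact ⟨i, by omega, (window_iff t p i (by omega)).mpr hw⟩

lemma countA_ne_zero_iff (t p : List Int) : pvCountA t p ≠ 0 ↔ (pvOcc t p ∧ t ≠ []) := by
  unfold pvCountA
  rw [PySem.List.pyRange_one]
  simp only [Int.sub_zero, Int.toNat_natCast, List.filter_map, List.length_map, zero_add]
  rw [Nat.ne_zero_iff_zero_lt, List.length_pos_iff_exists_mem]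
  simp only [List.mem_filter, List.mem_range, Function.comp_apply,
    PySem.List.slice_natCast_add, beq_iff_eq]
  constructor
  · rintro ⟨k, hk, he⟩
    have hlen := congrArg List.length he
    simp [List.length_take, List.length_drop] at hlen
    refine ⟨⟨k, by omega, he⟩, by rw [← List.length_pos_iff_ne_nil]; omega⟩
  · rintro ⟨⟨i, hi, he⟩, hne⟩
    rcases Nat.eq_zero_or_pos p.length with hm | hm
    · refine ⟨0, ⟨by rw [List.length_pos_iff_ne_nil]; exact hne, ?_⟩⟩
      simp [List.length_eq_zero_iff.mp hm]
    · exact ⟨i, ⟨by omega, he⟩⟩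

lemma step1_eq_rotate (t : List Int) (h : t ≠ []) : pvStep1 t = t.rotate 1 := by
  obtain ⟨a, l, rfl⟩ := List.exists_cons_of_ne_nil h
  simp [pvStep1, PySem.List.slice_from_one, List.rotate_cons_succ]

lemma step1_ne_nil (t : List Int) : pvStep1 t ≠ [] := by
  simp [pvStep1]

def pvAllRot (sub : List Int) : Nat → List Int → Bool
  | 0, _ => true
  | n+1, t => (pvCountA (pvStep1 t) sub == 0) && pvAllRot sub n (pvStep1 t)

lemma slide_fold (sub : List Int) (l : List Nat) (t : List Int) (b : Bool) :
    (l.foldl (fun (st : List Int × Bool) _ =>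
        let tmp := pvStep1 st.1
        (tmp, st.2 && (pvCountA tmp sub == 0))) (t, b)).2
    = (b && pvAllRot sub l.length t) := by
  induction l generalizing t b with
  | nil => simp [pvAllRot]
  | cons a l ih =>
    simp only [List.foldl_cons, List.length_cons, pvAllRot]
    rw [ih]
    rw [Bool.and_assoc]

lemma allRot_iff (sub : List Int) : ∀ (n : Nat) (t : List Int), t ≠ [] →
    (pvAllRot sub n t = true ↔ ∀ k < n, pvCountA (t.rotate (k+1)) sub = 0) := by
  intro n
  induction n with
  | zero => intro t _; simp [pvAllRot]
  | succ n ih =>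
    intro t ht
    rw [pvAllRot]
    simp only [Bool.and_eq_true, beq_iff_eq]
    rw [ih (pvStep1 t) (step1_ne_nil t)]
    rw [step1_eq_rotate t ht]
    constructor
    · rintro ⟨h0, h⟩ k hk
      rcases Nat.eq_zero_or_pos k with rfl | hkpos
      · simpa [step1_eq_rotate t ht] using h0
      · have := h (k - 1) (by omega)
        rw [List.rotate_rotate] at this
        simpa [show 1 + (k - 1 + 1) = k + 1 by omega] using this
    · intro h
      refine ⟨by simpa [step1_eq_rotate t ht] using h 0 (by omega), ?_⟩
      intro k hk
      rw [List.rotate_rotate, show 1 + (k + 1) = (k + 1) + 1 by omega]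
      exact h (k + 1) (by omega)

lemma rotate_infix_doubled (orig : List Int) (k : Nat) : orig.rotate k <:+: orig ++ orig := by
  rcases List.eq_nil_or_concat orig with rfl | _
  · simp
  · have hne : orig ≠ [] := by rintro rfl; simp_all
    have hn : 0 < orig.length := List.length_pos_of_ne_nil hne
    rw [← List.rotate_mod]
    set j := k % orig.length with hj
    have hjlt : j ≤ orig.length := le_of_lt (Nat.mod_lt _ hn)
    rw [List.rotate_eq_drop_append_take hjlt]
    exact ⟨orig.take j, orig.drop j, by
      simp only [List.append_assoc]
      rw [List.take_append_drop, ← List.append_assoc, List.take_append_drop]⟩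

lemma doubled_to_rotate (orig p : List Int) (hm : p.length ≤ orig.length)
    (h : p <:+: orig ++ orig) : ∃ k, k ≤ orig.length ∧ p <:+: orig.rotate k := by
  obtain ⟨i, hi, he⟩ := (pvOcc_iff_infix _ _).mpr h
  simp only [List.length_append] at hi
  rcases le_or_gt i orig.length with hin | hin
  · refine ⟨i, hin, ?_⟩
    rw [List.drop_append_of_le_length hin] at he
    have hsplit : orig.drop i ++ orig = orig.rotate i ++ orig.drop i := by
      rw [List.rotate_eq_drop_append_take hin, List.append_assoc, List.take_append_drop]
    rw [hsplit] at he
    rw [List.take_append_of_le_length (by simp [List.length_rotate]; omega)] at he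
    rw [← he]
    exact (List.take_prefix _ _).isInfix
  · refine ⟨0, by omega, ?_⟩
    rw [List.rotate_zero]
    have hdrop : (orig ++ orig).drop i = orig.drop (i - orig.length) := by
      rw [List.drop_append]
      simp [List.drop_eq_nil_of_le (le_of_lt hin)]
    rw [hdrop] at he
    apply (pvOcc_iff_infix _ _).mp
    exact ⟨i - orig.length, by omega, he⟩

lemma countA_nil (p : List Int) : pvCountA [] p = 0 := by
  simp [pvCountA]

lemma exists_rot_iff (orig p : List Int) :
    (∃ k, k ≤ orig.length ∧ p <:+: orig.rotate k) ↔ (p.length ≤ orig.length ∧ p <:+: orig ++ orig) := by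
  constructor
  · rintro ⟨k, hk, hi⟩
    refine ⟨by have := hi.length_le; simpa [List.length_rotate] using this,
            hi.trans (rotate_infix_doubled orig k)⟩
  · rintro ⟨hm, hi⟩
    obtain ⟨k, hk, hi'⟩ := doubled_to_rotate orig p hm hi
    exact ⟨k, hk, hi'⟩

lemma noRevA_true_iff (orig p : List Int) (hne : orig ≠ []) :
    (pvNoRevA orig p true = true) ↔ ∃ k, k ≤ orig.length ∧ p <:+: orig.rotate k := by
  show (!pvSlideA orig p (pvCountA orig p == 0)) = true ↔ _
  unfold pvSlideA
  rw [slide_fold]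
  rw [Bool.not_eq_eq_eq_not]
  show _ = false ↔ _
  rw [Bool.and_eq_false_iff]
  rw [show ((pvCountA orig p == 0) = false) ↔ pvCountA orig p ≠ 0 by simp]
  rw [Bool.eq_false_iff]
  simp only [List.length_range]
  rw [show (pvAllRot p orig.length orig ≠ true) ↔ ¬ (pvAllRot p orig.length orig = true) from Iff.rfl]
  rw [allRot_iff p orig.length orig hne]
  push Not
  constructor
  · rintro (h0 | ⟨k, hk, hc⟩)
    · obtain ⟨hocc, -⟩ := (countA_ne_zero_iff orig p).mp h0
      exact ⟨0, by omega, by rw [List.rotate_zero]; exact (pvOcc_iff_infix _ _).mp hocc⟩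
    · obtain ⟨hocc, -⟩ := (countA_ne_zero_iff _ p).mp hc
      exact ⟨k + 1, by omega, (pvOcc_iff_infix _ _).mp hocc⟩
  · rintro ⟨k, hk, hi⟩
    rcases Nat.eq_zero_or_pos k with rfl | hkpos
    · rw [List.rotate_zero] at hi
      exact Or.inl ((countA_ne_zero_iff orig p).mpr ⟨(pvOcc_iff_infix _ _).mpr hi, hne⟩)
    · refine Or.inr ⟨k - 1, by omega, ?_⟩
      rw [show k - 1 + 1 = k by omega]
      refine (countA_ne_zero_iff _ p).mpr ⟨(pvOcc_iff_infix _ _).mpr hi, ?_⟩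
      rw [ne_eq, List.rotate_eq_nil_iff]
      exact hne

lemma key_lemma (orig p : List Int) (slide : Bool) (h : ¬(orig = [] ∧ p = [])) :
    pvNoRevA orig p slide
      = (if slide then (decide (p.length ≤ orig.length) && pvFindB (orig ++ orig) p) else pvFindB orig p) := by
  simp only [findB_eq_findN]
  cases slide with
  | false =>
    show (!(pvCountA orig p == 0)) = pvFindN orig p
    rw [Bool.eq_iff_iff]
    rw [show ((!(pvCountA orig p == 0)) = true) ↔ pvCountA orig p ≠ 0 by simp]
    rw [countA_ne_zero_iff, findN_iff]
    rcases List.eq_nil_or_concat orig with rfl | hc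
    · have hp : p ≠ [] := fun hp => h ⟨rfl, hp⟩
      have hp1 : 0 < p.length := List.length_pos_of_ne_nil hp
      constructor
      · rintro ⟨_, hne⟩; exact absurd rfl hne
      · rintro ⟨i, hi, -⟩
        exfalso
        simp only [List.length_nil] at hi
        omega
    · have hne : orig ≠ [] := by rintro rfl; simp_all
      tauto
  | true =>
    show pvNoRevA orig p true = (decide (p.length ≤ orig.length) && pvFindN (orig ++ orig) p)
    rcases List.eq_nil_or_concat orig with rfl | hc
    · have hp : p ≠ [] := fun hp => h ⟨rfl, hp⟩
      have hp1 : 0 < p.length := List.length_pos_of_ne_nil hp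
      show (!pvSlideA [] p (pvCountA [] p == 0)) = _
      unfold pvSlideA
      rw [slide_fold]
      simp [pvAllRot, countA_nil, Nat.not_le.mpr hp1]
    · have hne : orig ≠ [] := by rintro rfl; simp_all
      rw [Bool.eq_iff_iff, noRevA_true_iff orig p hne, exists_rot_iff]
      rw [show ((decide (p.length ≤ orig.length) && pvFindN (orig ++ orig) p) = true) ↔
            (p.length ≤ orig.length ∧ pvFindN (orig ++ orig) p = true) by simp]
      rw [findN_iff, pvOcc_iff_infix]

lemma A_decomp (orig sub : List Int) (rev slide : Bool) :
    containsSubarray orig sub rev slide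
      = (pvNoRevA orig sub slide || (rev && pvNoRevA orig sub.reverse slide)) := by
  unfold containsSubarray pvNoRevA
  cases rev <;> cases slide <;>
    simp [Bool.not_and, Bool.not_not]

lemma B_decomp (orig sub : List Int) (rev slide : Bool) :
    containsSubarray_alt orig sub rev slide
      = ((if slide then (decide (sub.length ≤ orig.length) && pvFindB (orig ++ orig) sub) else pvFindB orig sub)
         || (rev && (if slide then (decide (sub.reverse.length ≤ orig.length) && pvFindB (orig ++ orig) sub.reverse) else pvFindB orig sub.reverse))) := by
  unfold containsSubarray_alt
  cases rev <;> cases slide <;> simp [List.any]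

-- ===== VERDICT (by name: the statement is the Claim_ definition above) =====
theorem containsSubarray_spec : Claim_unchanged_containsSubarray := by
  intro orig sub rev slide _ hD
  rw [A_decomp, B_decomp]
  rw [key_lemma orig sub slide (by unfold D_containsSubarray at hD; tauto)]
  rw [key_lemma orig sub.reverse slide (by
    unfold D_containsSubarray at hD
    simp only [List.reverse_eq_nil_iff]
    tauto)]

theorem containsSubarray_changed : Claim_changed_containsSubarray := by
  unfold Claim_changed_containsSubarray; decide

theorem containsSubarray_tight : Claim_exact_containsSubarray := by
  intro orig sub rev slide _ hD
  obtain ⟨rfl, rfl⟩ := hD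
  cases rev <;> cases slide <;> decide
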